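-- pv_equiv track=rewrite | github.com/PPinto22/LeetCode | kickstart/2020 Round C/a.py | solve
-- ===== SOURCE A (Python) =====
-- def solve(N, K, numbers):
--     count = 0
--     i = 0
--     while i < N-K+1:
--         start = i
--         for i in range(i, i + K):
--             if K - numbers[i] != i - start:
--                 break
--         else:
--             count += 1
--         i = max(i, start + 1)
--
--     return count
-- ===== SOURCE B (Python) =====
-- def solve(N, K, numbers):
--     # Single pass: a window of length K ending at i matches [K, K-1, ..., 1]
--     # exactly when numbers[i] == 1 and the run of consecutive "previous value
--     # minus 1" steps reaching i has length at least K.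
--     count = 0
--     run = 0
--     for i in range(N):
--         run = run + 1 if i > 0 and numbers[i] == numbers[i - 1] - 1 else 1
--         if numbers[i] == 1 and run >= K:
--             count += 1
--     return count
-- ===== Notes on version B (the rewrite author's own statement) =====
-- stated objective: alternative
-- what changed: Replaces A's restartable window-scanning while-loop (inner for over each candidate window plus skip logic) by a single left-to-right pass maintaining the run-length of consecutive decrement-by-1 values, counting positions where the value is 1 and the run is at least K; Pre_ excludes N > len(numbers), where A can raise IndexError and B raises too, and K <= 0 with 0 < N-K+1, where every window is empty and A's value N-K+1 is an artefact of Python's for-else firing on an empty inner range.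
-- outside the precondition, e.g. on solve(3, 0, [1, 2, 3]): A returns 4, B returns 1; on solve(3, 3, [5]): A returns 0, B raises IndexError
import Mathlib
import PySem

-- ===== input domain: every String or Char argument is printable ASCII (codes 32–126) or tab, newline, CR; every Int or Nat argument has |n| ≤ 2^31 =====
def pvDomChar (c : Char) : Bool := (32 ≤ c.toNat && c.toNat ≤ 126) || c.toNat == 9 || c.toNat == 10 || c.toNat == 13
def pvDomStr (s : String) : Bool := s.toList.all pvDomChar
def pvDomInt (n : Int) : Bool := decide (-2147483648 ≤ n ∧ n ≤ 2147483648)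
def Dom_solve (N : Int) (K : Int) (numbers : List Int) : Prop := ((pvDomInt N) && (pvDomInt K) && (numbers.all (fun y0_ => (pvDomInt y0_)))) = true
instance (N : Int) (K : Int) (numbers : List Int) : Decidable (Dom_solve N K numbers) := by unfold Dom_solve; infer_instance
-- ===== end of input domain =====

-- B counts matching windows in one pass via the run-length of consecutive decrement-by-1
-- values; equivalence is claimed on 1 ≤ K and N ≤ len(numbers).

-- ===== PORT A =====
-- inner 'for i in range(start, start+K)': returns (final value of i, whether it broke).
-- numbers[i] is read with pyGetD (an out-of-range read is an IndexError in Python;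
-- Pre_solve keeps every read in range).
def goA (K : Int) (nums : List Int) (start : Int) : Int → Nat → Int × Bool
  | j, 0 => (j - 1, false)
  | j, t+1 =>
    if K - PySem.List.pyGetD nums j 0 ≠ j - start then (j, true)
    else goA K nums start (j+1) t

-- empty range (K ≤ 0): i is left unchanged and the else-branch runs (no break)
def innerA (K : Int) (nums : List Int) (start : Int) : Int × Bool :=
  if K ≤ 0 then (start, false) else goA K nums start start K.toNat

def solveLoop (N : Int) (K : Int) (nums : List Int) (i : Int) (count : Int) : Int :=
  if h : i < N - K + 1 then
    let r := innerA K nums i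
    solveLoop N K nums (max r.1 (i+1)) (if r.2 then count else count + 1)
  else count
termination_by (N - K + 1 - i).toNat
decreasing_by
  have := le_max_right (innerA K nums i).1 (i+1); omega

def solve (N : Int) (K : Int) (numbers : List Int) : Int :=
  solveLoop N K numbers 0 0

-- ===== PORT B =====
def stepB (K : Int) (nums : List Int) (st : Int × Int) (i : Int) : Int × Int :=
  let run := if 0 < i ∧ PySem.List.pyGetD nums i 0 = PySem.List.pyGetD nums (i-1) 0 - 1
             then st.2 + 1 else 1
  (if PySem.List.pyGetD nums i 0 = 1 ∧ K ≤ run then st.1 + 1 else st.1, run)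

def solve_alt (N : Int) (K : Int) (numbers : List Int) : Int :=
  ((PySem.List.pyRange 0 N 1).foldl (stepB K numbers) (0, 0)).1

-- ===== PRECONDITION & SPEC =====
-- Pre_solve excludes (a) N > len(numbers), where A can raise IndexError and B's pass over
-- the first N entries raises too, and (b) K ≤ 0 with a non-empty start range (0 < N-K+1),
-- where every window is empty and A's value N-K+1 is an artefact of Python's for-else
-- firing on an empty inner range — a corner no caller specifies either way.
def Pre_solve (N : Int) (K : Int) (numbers : List Int) : Prop :=
  N ≤ numbers.length ∧ (1 ≤ K ∨ N - K + 1 ≤ 0)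

instance (N : Int) (K : Int) (numbers : List Int) : Decidable (Pre_solve N K numbers) := by
  unfold Pre_solve; infer_instance

def pvWitness_solve : Int × Int × List Int := (3, 2, [3, 2, 1])

def Spec_solve (N : Int) (K : Int) (numbers : List Int) (out : Int) : Prop := out = solve_alt N K numbers
instance (N : Int) (K : Int) (numbers : List Int) (out : Int) : Decidable (Spec_solve N K numbers out) := by unfold Spec_solve; infer_instance

-- ===== CLAIM (what is proved, stated in full; the proofs are below) =====
def Claim_equal_solve : Prop := ∀ (N : Int) (K : Int) (numbers : List Int), Dom_solve N K numbers → Pre_solve N K numbers → Spec_solve N K numbers (solve N K numbers)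

-- ===== LEMMAS AND PROOFS =====

-- window starting at s matches the pattern [K, K-1, ..., 1]
def matchB (K : Int) (nums : List Int) (s : Int) : Bool :=
  (List.range K.toNat).all (fun j => PySem.List.pyGetD nums (s + j) 0 = K - j)

lemma matchB_iff (K : Int) (nums : List Int) (s : Int) :
    matchB K nums s = true ↔ ∀ j : Nat, j < K.toNat → PySem.List.pyGetD nums (s + j) 0 = K - j := by
  simp [matchB]

-- count of matching windows with start in [i, N-K]
def cnt (N : Int) (K : Int) (nums : List Int) (i : Int) : Int :=
  if h : i < N - K + 1 then (if matchB K nums i then 1 else 0) + cnt N K nums (i+1) else 0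
termination_by (N - K + 1 - i).toNat
decreasing_by omega

lemma cnt_stop (N K : Int) (nums : List Int) (i : Int) (h : ¬ i < N - K + 1) :
    cnt N K nums i = 0 := by rw [cnt]; simp [h]

lemma cnt_step (N K : Int) (nums : List Int) (i : Int) (h : i < N - K + 1) :
    cnt N K nums i = (if matchB K nums i then 1 else 0) + cnt N K nums (i+1) := by
  rw [cnt]; simp [h]


def runAt (nums : List Int) : Nat → Int
  | 0 => 1
  | e+1 => if PySem.List.pyGetD nums ((e:Int)+1) 0 = PySem.List.pyGetD nums (e:Int) 0 - 1
           then runAt nums e + 1 else 1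

def bcnt (K : Int) (nums : List Int) : Nat → Int × Int
  | 0 => (0, 0)
  | n+1 => stepB K nums (bcnt K nums n) (n : Int)

def condB (K : Int) (nums : List Int) (e : Nat) : Bool :=
  decide (PySem.List.pyGetD nums (e:Int) 0 = 1 ∧ K ≤ runAt nums e)

lemma cnt_skip_aux (N K : Int) (nums : List Int) (n : Nat) :
    ∀ i : Int, (∀ s : Int, i ≤ s → s < i + (n:Int) → matchB K nums s = false) →
      cnt N K nums i = cnt N K nums (i + (n:Int)) := by
  induction n with
  | zero => intro i _; norm_num
  | succ n ih =>
    intro i hno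
    by_cases h : i < N - K + 1
    · rw [cnt_step N K nums i h, hno i le_rfl (by omega)]
      have := ih (i+1) (fun s hs1 hs2 => hno s (by omega) (by push_cast at hs2 ⊢; omega))
      rw [this]
      have he : i + 1 + (n:Int) = i + (((n:Nat)+1 : Nat) : Int) := by push_cast; ring
      rw [he]
      simp
    · rw [cnt_stop N K nums i h, cnt_stop N K nums _ (by push_cast; omega)]

lemma cnt_skip (N K : Int) (nums : List Int) (i i2 : Int) (hle : i ≤ i2)
    (hno : ∀ s, i ≤ s → s < i2 → matchB K nums s = false) :
    cnt N K nums i = cnt N K nums i2 := by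
  have h := cnt_skip_aux N K nums (i2 - i).toNat i
    (fun s hs1 hs2 => hno s hs1 (by omega))
  rw [h]
  congr 1
  omega

lemma goA_spec (K : Int) (nums : List Int) (start : Int) (t : Nat) (j : Int) :
    ((goA K nums start j t).2 = false ∧ (goA K nums start j t).1 = j + t - 1 ∧
      (∀ x, j ≤ x → x < j + t → PySem.List.pyGetD nums x 0 = K - (x - start)))
    ∨ ((goA K nums start j t).2 = true ∧ j ≤ (goA K nums start j t).1 ∧
      (goA K nums start j t).1 < j + t ∧
      (∀ x, j ≤ x → x < (goA K nums start j t).1 → PySem.List.pyGetD nums x 0 = K - (x - start)) ∧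
      PySem.List.pyGetD nums (goA K nums start j t).1 0 ≠ K - ((goA K nums start j t).1 - start)) := by
  induction t generalizing j with
  | zero =>
    left
    refine ⟨by simp [goA], by simp [goA], ?_⟩
    intro x h1 h2; omega
  | succ t ih =>
    by_cases hc : K - PySem.List.pyGetD nums j 0 ≠ j - start
    · right
      have hg : goA K nums start j (t+1) = (j, true) := by simp [goA, hc]
      rw [hg]
      refine ⟨rfl, le_rfl, by push_cast; omega, ?_,
        by show PySem.List.pyGetD nums j 0 ≠ K - (j - start); omega⟩
      intro x h1 h2; omega
    · have hj : PySem.List.pyGetD nums j 0 = K - (j - start) := by omega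
      have hg : goA K nums start j (t+1) = goA K nums start (j+1) t := by simp [goA, hc]
      rw [hg]
      rcases ih (j+1) with ⟨h1, h2, h3⟩ | ⟨h1, h2, h3, h4, h5⟩
      · left
        refine ⟨h1, by rw [h2]; push_cast; ring, ?_⟩
        intro x hx1 hx2
        rcases eq_or_lt_of_le hx1 with rfl | hlt
        · exact hj
        · exact h3 x (by omega) (by push_cast at hx2 ⊢; omega)
      · right
        refine ⟨h1, by omega, by push_cast at h3 ⊢; omega, ?_, h5⟩
        intro x hx1 hx2
        rcases eq_or_lt_of_le hx1 with rfl | hlt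
        · exact hj
        · exact h4 x (by omega) hx2

lemma innerA_spec (K : Int) (nums : List Int) (i : Int) :
    ((innerA K nums i).2 = false ↔ matchB K nums i = true) ∧
    (∀ x, i ≤ x → x < (innerA K nums i).1 → PySem.List.pyGetD nums x 0 = K - (x - i)) := by
  unfold innerA
  by_cases h0 : K ≤ 0
  · rw [if_pos h0]
    have hK0 : K.toNat = 0 := by omega
    constructor
    · simp [matchB, hK0]
    · intro x h1 h2; omega
  · rw [if_neg h0]
    have hKt : (K.toNat : Int) = K := by omega
    rcases goA_spec K nums i K.toNat i with ⟨h1, h2, h3⟩ | ⟨h1, h2, h3, h4, h5⟩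
    · constructor
      · rw [h1, matchB_iff]
        simp only [true_iff]
        intro j hj
        rw [h3 (i + j) (by omega) (by omega)]
        ring
      · intro x hx1 hx2
        exact h3 x hx1 (by omega)
    · constructor
      · rw [h1]
        simp only [Bool.true_eq_false, false_iff]
        intro hm
        rw [matchB_iff] at hm
        have hx := hm ((goA K nums i i K.toNat).1 - i).toNat (by omega)
        rw [show i + (((goA K nums i i K.toNat).1 - i).toNat : Int) = (goA K nums i i K.toNat).1 by omega] at hx
        apply h5
        rw [hx]
        omega
      · exact h4

theorem solveLoop_cnt (N K : Int) (nums : List Int) (i c : Int) :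
    solveLoop N K nums i c = c + cnt N K nums i := by
  rw [solveLoop]
  split
  · next h =>
    obtain ⟨hiff, hpre⟩ := innerA_spec K nums i
    rw [solveLoop_cnt N K nums (max (innerA K nums i).1 (i+1)) _]
    have hskip : cnt N K nums (i+1) = cnt N K nums (max (innerA K nums i).1 (i+1)) := by
      apply cnt_skip N K nums (i+1) _ (le_max_right _ _)
      intro s hs1 hs2
      have hs3 : s < (innerA K nums i).1 := by
        rcases max_cases (innerA K nums i).1 (i+1) with ⟨he, _⟩ | ⟨he, _⟩ <;> omega
      have hK1 : 0 < K := by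
        by_contra hc
        have hle : K ≤ 0 := by omega
        simp [innerA, hle] at hs3
        omega
      have hv := hpre s (by omega) hs3
      rw [← Bool.not_eq_true]
      rw [matchB_iff]
      intro hm
      have := hm 0 (by omega)
      simp at this
      omega
    rw [cnt_step N K nums i h, ← hskip]
    rcases hb : (innerA K nums i).2 with _ | _
    · have : matchB K nums i = true := hiff.mp hb
      rw [this]
      simp
      ring
    · have : matchB K nums i = false := by
        rcases hm : matchB K nums i with _ | _
        · rfl
        · have := hiff.mpr hm; rw [hb] at this; cases this
      rw [this]
      simp
  · next h =>
    rw [cnt_stop N K nums i h]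
    simp
termination_by (N - K + 1 - i).toNat
decreasing_by
  have := le_max_right (innerA K nums i).1 (i+1); omega

lemma runAt_pos (nums : List Int) (e : Nat) : 1 ≤ runAt nums e := by
  cases e <;> (rw [runAt]) <;> first | omega | (split <;> (have := runAt_pos nums ‹Nat›; omega))

lemma runAt_le (nums : List Int) (e : Nat) : runAt nums e ≤ (e:Int) + 1 := by
  induction e with
  | zero => rw [runAt]; norm_num
  | succ e ih => rw [runAt]; split <;> push_cast <;> omega

lemma runAt_decr (nums : List Int) (e : Nat) :
    ∀ j : Int, 0 ≤ j → j < runAt nums e →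
      PySem.List.pyGetD nums ((e:Int) - j) 0 = PySem.List.pyGetD nums (e:Int) 0 + j := by
  induction e with
  | zero =>
    intro j h0 hlt
    rw [runAt] at hlt
    have : j = 0 := by omega
    subst this
    simp
  | succ e ih =>
    intro j h0 hlt
    rw [runAt] at hlt
    split at hlt
    · next hcond =>
      rcases eq_or_lt_of_le h0 with rfl | hj1
      · simp
      · have hih := ih (j-1) (by omega) (by omega)
        have he : ((e+1:Nat):Int) - j = (e:Int) - (j-1) := by push_cast; ring
        rw [he, hih]
        have he2 : ((e+1:Nat):Int) = (e:Int) + 1 := by push_cast; ring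
        rw [he2]
        omega
    · have : j = 0 := by omega
      subst this
      simp

lemma runAt_ge (nums : List Int) :
    ∀ (e t : Nat), t ≤ e + 1 →
      (∀ j : Nat, j + 1 < t →
        PySem.List.pyGetD nums ((e:Int) - j) 0 = PySem.List.pyGetD nums ((e:Int) - j - 1) 0 - 1) →
      (t : Int) ≤ runAt nums e := by
  intro e
  induction e with
  | zero =>
    intro t hle _
    have := runAt_pos nums 0
    omega
  | succ e ih =>
    intro t hle h
    by_cases ht : t ≤ 1
    · have := runAt_pos nums (e+1)
      omega
    · have h0 := h 0 (by omega)
      rw [runAt]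
      rw [if_pos (by push_cast at h0 ⊢; simpa using h0)]
      have hih := ih (t-1) (by omega) ?_
      · omega
      · intro j hj
        have := h (j+1) (by omega)
        have he1 : ((e+1:Nat):Int) - (j+1:Nat) = (e:Int) - j := by push_cast; ring
        rw [he1] at this
        exact this

lemma cond_iff (K : Int) (nums : List Int) (e : Nat) (hK : 1 ≤ K) :
    condB K nums e = true ↔ (K - 1 ≤ (e:Int) ∧ matchB K nums ((e:Int) - K + 1) = true) := by
  unfold condB
  rw [decide_eq_true_iff, matchB_iff]
  constructor
  · rintro ⟨h1, h2⟩
    have hle := runAt_le nums e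
    refine ⟨by omega, ?_⟩
    intro j hj
    have hj' : ((j:Int)) < K := by omega
    have hd := runAt_decr nums e (K - 1 - j) (by omega) (by omega)
    have he : (e:Int) - (K - 1 - j) = (e:Int) - K + 1 + j := by ring
    rw [he] at hd
    rw [hd, h1]
    ring
  · rintro ⟨h1, h2⟩
    have hKt : (K.toNat : Int) = K := by omega
    have hlast := h2 (K.toNat - 1) (by omega)
    have he : (e:Int) - K + 1 + ((K.toNat - 1 : Nat) : Int) = (e:Int) := by
      push_cast; omega
    rw [he] at hlast
    have h1' : PySem.List.pyGetD nums (e:Int) 0 = 1 := by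
      rw [hlast]; push_cast; omega
    refine ⟨h1', ?_⟩
    have hge := runAt_ge nums e K.toNat (by omega) ?_
    · omega
    · intro j hj
      have ha := h2 (K.toNat - 1 - j) (by omega)
      have hb := h2 (K.toNat - 1 - (j+1)) (by omega)
      have hea : (e:Int) - K + 1 + ((K.toNat - 1 - j : Nat) : Int) = (e:Int) - j := by
        push_cast; omega
      have heb : (e:Int) - K + 1 + ((K.toNat - 1 - (j+1) : Nat) : Int) = (e:Int) - j - 1 := by
        push_cast; omega
      rw [hea] at ha
      rw [heb] at hb
      rw [ha, hb]
      push_cast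
      omega

lemma foldl_eq_bcnt_nat (K : Int) (nums : List Int) (n : Nat) :
    (PySem.List.pyRange 0 (n:Int) 1).foldl (stepB K nums) (0, 0) = bcnt K nums n := by
  induction n with
  | zero => rw [PySem.List.pyRange_one_eq_nil (by norm_num)]; rfl
  | succ n ih =>
    have he : ((n+1:Nat):Int) = (n:Int) + 1 := by push_cast; ring
    rw [he, PySem.List.pyRange_one_succ_right (by positivity), List.foldl_append]
    rw [ih]
    rfl

lemma foldl_eq_bcnt (N K : Int) (nums : List Int) (hN : 0 ≤ N) :
    (PySem.List.pyRange 0 N 1).foldl (stepB K nums) (0, 0) = bcnt K nums N.toNat := by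
  have h : N = ((N.toNat : Nat) : Int) := by omega
  conv_lhs => rw [h]
  rw [foldl_eq_bcnt_nat]

lemma bcnt_snd (K : Int) (nums : List Int) (e : Nat) :
    (bcnt K nums (e+1)).2 = runAt nums e := by
  induction e with
  | zero => simp [bcnt, stepB, runAt]
  | succ e ih =>
    show (stepB K nums (bcnt K nums (e+1)) ((e+1:Nat):Int)).2 = runAt nums (e+1)
    rw [stepB, runAt]
    simp only [ih]
    have h1 : (0:Int) < ((e+1:Nat):Int) := by positivity
    have h2 : ((e+1:Nat):Int) - 1 = (e:Int) := by push_cast; ring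
    have h3 : ((e+1:Nat):Int) = (e:Int) + 1 := by push_cast; ring
    rw [h2, h3]
    by_cases hc : PySem.List.pyGetD nums ((e:Int)+1) 0 = PySem.List.pyGetD nums (e:Int) 0 - 1
    · rw [if_pos (by exact ⟨by omega, hc⟩), if_pos hc]
    · rw [if_neg (by rintro ⟨_, hx⟩; exact hc hx), if_neg hc]

lemma runAt_step (K : Int) (nums : List Int) (n : Nat) :
    (if 0 < (n:Int) ∧ PySem.List.pyGetD nums (n:Int) 0 = PySem.List.pyGetD nums ((n:Int)-1) 0 - 1
     then (bcnt K nums n).2 + 1 else 1) = runAt nums n := by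
  cases n with
  | zero => rw [if_neg (by rintro ⟨h, _⟩; norm_num at h)]; rfl
  | succ e =>
    rw [bcnt_snd, runAt]
    have h2 : ((e+1:Nat):Int) - 1 = (e:Int) := by push_cast; ring
    have h3 : ((e+1:Nat):Int) = (e:Int) + 1 := by push_cast; ring
    rw [h2, h3]
    by_cases hc : PySem.List.pyGetD nums ((e:Int)+1) 0 = PySem.List.pyGetD nums (e:Int) 0 - 1
    · rw [if_pos (by exact ⟨by omega, hc⟩), if_pos hc]
    · rw [if_neg (by rintro ⟨_, hx⟩; exact hc hx), if_neg hc]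

lemma bcnt_fst (K : Int) (nums : List Int) (n : Nat) :
    (bcnt K nums n).1 = ((List.range n).countP (condB K nums) : Int) := by
  induction n with
  | zero => rfl
  | succ n ih =>
    show (stepB K nums (bcnt K nums n) (n:Int)).1 = _
    rw [List.range_succ, List.countP_append, stepB]
    simp only [runAt_step]
    by_cases hc : PySem.List.pyGetD nums (n:Int) 0 = 1 ∧ K ≤ runAt nums n
    · have hcb : condB K nums n = true := by unfold condB; exact decide_eq_true hc
      rw [if_pos hc]
      have h1 : List.countP (condB K nums) [n] = 1 := by simp [List.countP_cons, hcb]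
      rw [ih, h1]
      push_cast
      ring
    · have hcb : condB K nums n = false := by unfold condB; exact decide_eq_false hc
      rw [if_neg hc]
      have h1 : List.countP (condB K nums) [n] = 0 := by simp [List.countP_cons, hcb]
      rw [ih, h1]
      push_cast
      ring

lemma shift_count (K : Int) (nums : List Int) (hK : 1 ≤ K) (n : Nat) :
    (List.range n).countP (condB K nums)
      = (List.range (n - (K.toNat - 1))).countP (fun s : Nat => matchB K nums (s : Int)) := by
  set k := K.toNat - 1 with hk
  have hkK : (k : Int) = K - 1 := by omega
  by_cases hn : n ≤ k
  · have h0 : (List.range n).countP (condB K nums) = 0 := by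
      rw [List.countP_eq_zero]
      intro e he
      rw [List.mem_range] at he
      rcases hce : condB K nums e with _ | _
      · simp
      · exfalso
        have := (cond_iff K nums e hK).mp hce
        omega
    rw [h0, Nat.sub_eq_zero_of_le hn]
    simp
  · have hsplit : n = k + (n - k) := by omega
    conv_lhs => rw [hsplit]
    rw [List.range_add, List.countP_append, List.countP_map]
    have h0 : (List.range k).countP (condB K nums) = 0 := by
      rw [List.countP_eq_zero]
      intro e he
      rw [List.mem_range] at he
      rcases hce : condB K nums e with _ | _
      · simp
      · exfalso
        have := (cond_iff K nums e hK).mp hce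
        omega
    rw [h0]
    have hcong : ∀ s ∈ List.range (n - k), (condB K nums ∘ (k + ·)) s = matchB K nums (s : Int) := by
      intro s _
      have he1 : ((k + s : Nat) : Int) - K + 1 = (s : Int) := by push_cast; omega
      rcases hm : matchB K nums (s : Int) with _ | _
      · show condB K nums (k + s) = false
        rcases hc : condB K nums (k + s) with _ | _
        · rfl
        · exfalso
          have := (cond_iff K nums (k + s) hK).mp hc
          rw [he1] at this
          rw [this.2] at hm
          cases hm
      · show condB K nums (k + s) = true
        apply (cond_iff K nums (k + s) hK).mpr
        refine ⟨by push_cast; omega, ?_⟩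
        rw [he1]
        exact hm
    rw [List.countP_congr (fun s hs => by rw [hcong s hs])]
    exact Nat.zero_add _

theorem cnt_eq_countP (N K : Int) (nums : List Int) (i : Int) :
    cnt N K nums i = (((PySem.List.pyRange i (N - K + 1) 1).countP (fun s => matchB K nums s) : Nat) : Int) := by
  rw [cnt]
  split
  · next h =>
    rw [PySem.List.pyRange_one_cons (by omega), List.countP_cons,
      cnt_eq_countP N K nums (i+1)]
    rcases hm : matchB K nums i with _ | _ <;> simp [hm] <;> omega
  · next h =>
    rw [PySem.List.pyRange_one_eq_nil (by omega)]
    simp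
termination_by (N - K + 1 - i).toNat
decreasing_by omega

lemma countP_pyRange_zero (b : Int) (p : Int → Bool) :
    (PySem.List.pyRange 0 b 1).countP p = (List.range b.toNat).countP (fun s : Nat => p (s:Int)) := by
  rw [PySem.List.pyRange_one, List.countP_map]
  have : (b - 0).toNat = b.toNat := by omega
  rw [this]
  apply List.countP_congr
  intro s _
  show p ((0:Int) + s) = true ↔ _
  rw [zero_add]

lemma alt_eq_cnt (N K : Int) (nums : List Int) (hK : 1 ≤ K) :
    solve_alt N K nums = cnt N K nums 0 := by
  unfold solve_alt
  by_cases hN : 0 ≤ N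
  · rw [foldl_eq_bcnt N K nums hN, bcnt_fst, shift_count K nums hK, cnt_eq_countP,
      countP_pyRange_zero]
    have hsz : (N - K + 1).toNat = N.toNat - (K.toNat - 1) := by omega
    rw [hsz]
  · have h1 : PySem.List.pyRange 0 N 1 = [] := PySem.List.pyRange_one_eq_nil (by omega)
    rw [h1, cnt_stop N K nums 0 (by omega)]
    rfl

-- ===== VERDICT (by name: the statement is the Claim_ definition above) =====
theorem solve_spec : Claim_equal_solve := by
  intro N K nums _ hpre
  unfold Spec_solve
  have h1 : solve N K nums = cnt N K nums 0 := by
    have := solveLoop_cnt N K nums 0 0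
    simpa [solve] using this
  rcases hpre with ⟨hlen, hK1 | hstop⟩
  · rw [h1, alt_eq_cnt N K nums hK1]
  · by_cases hK1 : 1 ≤ K
    · rw [h1, alt_eq_cnt N K nums hK1]
    · rw [h1, cnt_stop N K nums 0 (by omega)]
      have hB : solve_alt N K nums = 0 := by
        unfold solve_alt
        rw [PySem.List.pyRange_one_eq_nil (by omega)]
        rfl
      rw [hB]
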